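-- pv_equiv track=rewrite | github.com/surajit93/phoneblogs | scripts/page_generator.py | pros_cons_v2
-- ===== SOURCE A (Python) =====
-- def get_spec(p, k):
--     return p.get("specs", {}).get(k, 0)
--
-- def pros_cons_v2(p):
--     bat = get_spec(p, "battery")
--     ram = get_spec(p, "ram")
--     cam = get_spec(p, "camera")
--
--     pros = []
--     cons = []
--
--     if bat >= 5000:
--         pros.append("Strong battery life for extended daily use")
--     elif bat >= 4500:
--         pros.append("Decent battery backup for most users")
--     else:
--         cons.append("Battery may struggle under heavy usage")
--
--     if ram >= 8:
--         pros.append("Handles multitasking and gaming smoothly")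
--     elif ram >= 6:
--         pros.append("Good for regular apps and moderate usage")
--     else:
--         cons.append("Limited RAM for demanding apps")
--
--     if cam >= 64:
--         pros.append("High resolution camera for detailed photos")
--     elif cam >= 48:
--         pros.append("Good camera for everyday photography")
--     else:
--         cons.append("Camera not ideal for detailed shots")
--
--     return f"""
-- <div class="pros-cons">
-- <div class="pros"><ul>{"".join(f"<li>{x}</li>" for x in pros)}</ul></div>
-- <div class="cons"><ul>{"".join(f"<li>{x}</li>" for x in cons or ['No major drawbacks in this segment'])}</ul></div>
-- </div>
-- """
-- ===== SOURCE B (Python) =====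
-- FEATURES = [
--     ("battery", (4500, 5000),
--      ["Battery may struggle under heavy usage",
--       "Decent battery backup for most users",
--       "Strong battery life for extended daily use"]),
--     ("ram", (6, 8),
--      ["Limited RAM for demanding apps",
--       "Good for regular apps and moderate usage",
--       "Handles multitasking and gaming smoothly"]),
--     ("camera", (48, 64),
--      ["Camera not ideal for detailed shots",
--       "Good camera for everyday photography",
--       "High resolution camera for detailed photos"]),
-- ]
--
-- def pros_cons_v2(p):
--     specs = p.get("specs", {})
--     # tier index = number of ascending cutoffs the value reaches (0 = con, 1/2 = pro)
--     graded = [(msgs, sum(specs.get(k, 0) >= c for c in cuts))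
--               for k, cuts, msgs in FEATURES]
--     pros = [msgs[i] for msgs, i in graded if i]
--     cons = [msgs[0] for msgs, i in graded if not i] \
--         or ["No major drawbacks in this segment"]
--     return f"""
-- <div class="pros-cons">
-- <div class="pros"><ul>{"".join(f"<li>{x}</li>" for x in pros)}</ul></div>
-- <div class="cons"><ul>{"".join(f"<li>{x}</li>" for x in cons)}</ul></div>
-- </div>
-- """
-- ===== Notes on version B (the rewrite author's own statement) =====
-- stated objective: alternative
-- what changed: Replaces the three if/elif/else branch chains with a branch-free arithmetic grading: each feature's tier index is computed as the count of ascending cutoffs the value reaches, that index selects the message from a per-feature list, and two comprehensions partition the graded features into pros (tier > 0) and cons (tier 0); A instead interleaves appends to two accumulators inside explicit conditionals.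
import Mathlib
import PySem

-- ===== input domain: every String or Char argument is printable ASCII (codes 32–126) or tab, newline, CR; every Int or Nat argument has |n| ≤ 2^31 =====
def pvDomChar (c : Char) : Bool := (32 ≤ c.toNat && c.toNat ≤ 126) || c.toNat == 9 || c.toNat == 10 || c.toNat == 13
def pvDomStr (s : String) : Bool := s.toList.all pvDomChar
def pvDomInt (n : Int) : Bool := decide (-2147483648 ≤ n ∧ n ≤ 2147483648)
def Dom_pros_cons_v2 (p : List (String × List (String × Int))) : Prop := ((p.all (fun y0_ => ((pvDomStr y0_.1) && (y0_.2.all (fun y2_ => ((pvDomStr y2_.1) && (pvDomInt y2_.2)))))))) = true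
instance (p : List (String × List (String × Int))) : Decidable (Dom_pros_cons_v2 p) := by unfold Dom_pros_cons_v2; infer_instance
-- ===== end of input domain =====

-- B drops A's three if/elif/else chains: it grades each feature arithmetically (tier index =
-- count of ascending cutoffs reached), indexes a message list with that tier, and partitions
-- the graded features into pros/cons with two comprehensions; objective: simpler.

-- ===== PORT A =====
-- get_spec(p, k) = p.get("specs", {}).get(k, 0)
def get_spec (p : List (String × List (String × Int))) (k : String) : Int :=
  PySem.Dict.getD (PySem.Dict.mk (PySem.Dict.getD (PySem.Dict.mk p) "specs" [])) k 0

def pros_cons_v2 (p : List (String × List (String × Int))) : String :=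
  let bat := get_spec p "battery"
  let ram := get_spec p "ram"
  let cam := get_spec p "camera"
  let pros : List String := []
  let cons : List String := []
  let (pros, cons) :=
    if bat ≥ 5000 then (pros ++ ["Strong battery life for extended daily use"], cons)
    else if bat ≥ 4500 then (pros ++ ["Decent battery backup for most users"], cons)
    else (pros, cons ++ ["Battery may struggle under heavy usage"])
  let (pros, cons) :=
    if ram ≥ 8 then (pros ++ ["Handles multitasking and gaming smoothly"], cons)
    else if ram ≥ 6 then (pros ++ ["Good for regular apps and moderate usage"], cons)
    else (pros, cons ++ ["Limited RAM for demanding apps"])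
  let (pros, cons) :=
    if cam ≥ 64 then (pros ++ ["High resolution camera for detailed photos"], cons)
    else if cam ≥ 48 then (pros ++ ["Good camera for everyday photography"], cons)
    else (pros, cons ++ ["Camera not ideal for detailed shots"])
  "\n<div class=\"pros-cons\">\n<div class=\"pros\"><ul>"
    ++ String.join (pros.map (fun x => "<li>" ++ x ++ "</li>"))
    ++ "</ul></div>\n<div class=\"cons\"><ul>"
    ++ String.join ((if cons.isEmpty then ["No major drawbacks in this segment"] else cons).map
        (fun x => "<li>" ++ x ++ "</li>"))
    ++ "</ul></div>\n</div>\n"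

-- ===== PORT B =====
-- FEATURES: (spec key, ascending cutoffs, messages indexed by tier: [con, mid pro, top pro])
def pvFeatures : List (String × (Int × Int) × List String) :=
  [("battery", (4500, 5000),
    ["Battery may struggle under heavy usage",
     "Decent battery backup for most users",
     "Strong battery life for extended daily use"]),
   ("ram", (6, 8),
    ["Limited RAM for demanding apps",
     "Good for regular apps and moderate usage",
     "Handles multitasking and gaming smoothly"]),
   ("camera", (48, 64),
    ["Camera not ideal for detailed shots",
     "Good camera for everyday photography",
     "High resolution camera for detailed photos"])]

def pros_cons_v2_alt (p : List (String × List (String × Int))) : String :=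
  let specs := PySem.Dict.getD (PySem.Dict.mk p) "specs" []
  -- tier index = sum(v >= c for c in cuts); port of sum over the 2-tuple of booleans
  let graded : List (List String × Nat) := pvFeatures.map (fun f =>
    let v := PySem.Dict.getD (PySem.Dict.mk specs) f.1 0
    (f.2.2, [f.2.1.1, f.2.1.2].foldl (fun n c => n + (if v ≥ c then 1 else 0)) 0))
  -- msgs[i]: i ∈ {0,1,2}, msgs has length 3, so the index is always in range
  let pros := (graded.filter (fun g => ¬ g.2 = 0)).map
    (fun g => (PySem.List.pyGet? g.1 (g.2 : Int)).getD "")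
  let cons0 := (graded.filter (fun g => g.2 = 0)).map
    (fun g => (PySem.List.pyGet? g.1 0).getD "")
  let cons := if cons0.isEmpty then ["No major drawbacks in this segment"] else cons0
  "\n<div class=\"pros-cons\">\n<div class=\"pros\"><ul>"
    ++ String.join (pros.map (fun x => "<li>" ++ x ++ "</li>"))
    ++ "</ul></div>\n<div class=\"cons\"><ul>"
    ++ String.join (cons.map (fun x => "<li>" ++ x ++ "</li>"))
    ++ "</ul></div>\n</div>\n"

-- ===== PRECONDITION & SPEC =====
def Spec_pros_cons_v2 (p : List (String × List (String × Int))) (out : String) : Prop := out = pros_cons_v2_alt p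
instance (p : List (String × List (String × Int))) (out : String) : Decidable (Spec_pros_cons_v2 p out) := by unfold Spec_pros_cons_v2; infer_instance

-- ===== CLAIM (what is proved, stated in full; the proofs are below) =====
def Claim_equal_pros_cons_v2 : Prop := ∀ (p : List (String × List (String × Int))), Dom_pros_cons_v2 p → Spec_pros_cons_v2 p (pros_cons_v2 p)

-- ===== LEMMAS AND PROOFS =====

-- ===== VERDICT (by name: the statement is the Claim_ definition above) =====
set_option maxHeartbeats 4000000 in
set_option maxRecDepth 10000 in
theorem pros_cons_v2_spec : Claim_equal_pros_cons_v2 := by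
  intro p _
  unfold Spec_pros_cons_v2 pros_cons_v2 pros_cons_v2_alt get_spec
  simp only [pvFeatures, List.map, List.foldl]
  generalize (PySem.Dict.getD (PySem.Dict.mk p) "specs" ([] : List (String × Int))) = s
  generalize PySem.Dict.getD (PySem.Dict.mk s) "battery" 0 = bat
  generalize PySem.Dict.getD (PySem.Dict.mk s) "ram" 0 = ram
  generalize PySem.Dict.getD (PySem.Dict.mk s) "camera" 0 = cam
  split_ifs <;> first | rfl | omega | simp_all
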